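-- pv_equiv track=rewrite | github.com/VerbalAid/Medical_Justifications_Human_vs_LLM_-Corpus_Linguistics- | pipeline/snomed_taxonomy_compare.py | compact_top_down
-- ===== SOURCE A (Python) =====
-- def compact_top_down(path_td: list[str]) -> list[tuple[str, str | None, int | None]]:
--     k = len(path_td)
--     if k == 0:
--         return []
--     if k <= 6:
--         out: list[tuple[str, str | None, int | None]] = []
--         for i, cid in enumerate(path_td):
--             if i == 0:
--                 out.append(("lca", cid, None))
--             elif i == k - 1:
--                 out.append(("focal", cid, None))
--             else:
--                 out.append(("anc", cid, None))
--         return out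
--     skip_lo, skip_hi = 2, k - 4
--     n_skip = skip_hi - skip_lo + 1 if skip_hi >= skip_lo else 0
--     out = [("lca", path_td[0], None), ("anc", path_td[1], None)]
--     if n_skip > 0:
--         out.append(("ellipsis", None, n_skip))
--     out.append(("anc", path_td[k - 3], None))
--     out.append(("anc", path_td[k - 2], None))
--     out.append(("focal", path_td[k - 1], None))
--     return out
-- ===== SOURCE B (Python) =====
-- def compact_top_down(path_td: list[str]) -> list[tuple[str, str | None, int | None]]:
--     k = len(path_td)
--     full = [
--         ("lca" if i == 0 else "focal" if i == k - 1 else "anc", cid, None)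
--         for i, cid in enumerate(path_td)
--     ]
--     if k <= 6:
--         return full
--     return full[:2] + [("ellipsis", None, k - 5)] + full[k - 3:]
-- ===== Notes on version B (the rewrite author's own statement) =====
-- stated objective: simpler
-- what changed: B builds one uniformly labeled list over all indices in a single comprehension and, for long paths, collapses the interior by slicing (full[:2] + ellipsis + full[k-3:]) with the closed-form skip count k-5, replacing A's two hand-constructed branches (selective index emission plus explicit skip-range arithmetic).
import Mathlib
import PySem

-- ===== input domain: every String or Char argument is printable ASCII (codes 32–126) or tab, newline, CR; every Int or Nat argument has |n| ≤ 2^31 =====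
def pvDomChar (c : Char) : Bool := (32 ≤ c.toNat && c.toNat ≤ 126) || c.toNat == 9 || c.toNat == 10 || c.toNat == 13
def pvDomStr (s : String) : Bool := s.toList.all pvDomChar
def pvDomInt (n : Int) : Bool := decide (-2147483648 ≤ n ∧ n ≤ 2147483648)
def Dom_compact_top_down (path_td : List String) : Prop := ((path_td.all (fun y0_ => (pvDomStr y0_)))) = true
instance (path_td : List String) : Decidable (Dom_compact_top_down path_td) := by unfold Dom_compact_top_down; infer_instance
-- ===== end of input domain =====

-- B replaces A's two hand-built branches by one uniformly labeled list that is sliced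
-- (full[:2] ++ ellipsis ++ full[k-3:]) when the path is long; objective: simpler.

-- ===== PORT A =====
def compact_top_down (path_td : List String) : List (String × Option String × Option Int) :=
  let k : Int := path_td.length
  if k = 0 then []
  else if k ≤ 6 then
    (PySem.List.enumerate path_td 0).foldl (fun out (p : Int × String) =>
      if p.1 = 0 then out ++ [("lca", some p.2, (none : Option Int))]
      else if p.1 = k - 1 then out ++ [("focal", some p.2, (none : Option Int))]
      else out ++ [("anc", some p.2, (none : Option Int))]) []
  else
    let skip_lo : Int := 2
    let skip_hi : Int := k - 4
    let n_skip : Int := if skip_hi ≥ skip_lo then skip_hi - skip_lo + 1 else 0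
    -- indices 0, 1, k-3, k-2, k-1 are in range here (k ≥ 7), so pyGetD is exact
    let out : List (String × Option String × Option Int) :=
      [("lca", some (PySem.List.pyGetD path_td 0 ""), none),
       ("anc", some (PySem.List.pyGetD path_td 1 ""), none)]
    let out := if n_skip > 0 then out ++ [("ellipsis", none, some n_skip)] else out
    out ++ [("anc", some (PySem.List.pyGetD path_td (k - 3) ""), none),
            ("anc", some (PySem.List.pyGetD path_td (k - 2) ""), none),
            ("focal", some (PySem.List.pyGetD path_td (k - 1) ""), none)]

-- ===== PORT B =====
def compact_top_down_alt (path_td : List String) : List (String × Option String × Option Int) :=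
  let k : Int := path_td.length
  let full := (PySem.List.enumerate path_td 0).map (fun p =>
    ((if p.1 = 0 then "lca" else if p.1 = k - 1 then "focal" else "anc"), some p.2, (none : Option Int)))
  if k ≤ 6 then full
  else PySem.List.slice full none (some 2)
       ++ [("ellipsis", none, some (k - 5))]
       ++ PySem.List.slice full (some (k - 3)) none

-- ===== PRECONDITION & SPEC =====
def Spec_compact_top_down (path_td : List String) (out : List (String × Option String × Option Int)) : Prop := out = compact_top_down_alt path_td
instance (path_td : List String) (out : List (String × Option String × Option Int)) : Decidable (Spec_compact_top_down path_td out) := by unfold Spec_compact_top_down; infer_instance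

-- ===== CLAIM (what is proved, stated in full; the proofs are below) =====
def Claim_equal_compact_top_down : Prop := ∀ (path_td : List String), Dom_compact_top_down path_td → Spec_compact_top_down path_td (compact_top_down path_td)

-- ===== LEMMAS AND PROOFS =====

theorem fold_eq_map (xs : List String) (k : Int) :
    (PySem.List.enumerate xs 0).foldl (fun out (p : Int × String) =>
      if p.1 = 0 then out ++ [("lca", some p.2, (none : Option Int))]
      else if p.1 = k - 1 then out ++ [("focal", some p.2, (none : Option Int))]
      else out ++ [("anc", some p.2, (none : Option Int))]) [] =
    (PySem.List.enumerate xs 0).map (fun p =>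
      ((if p.1 = 0 then "lca" else if p.1 = k - 1 then "focal" else "anc"), some p.2, (none : Option Int))) := by
  have hb : (fun (out : List (String × Option String × Option Int)) (p : Int × String) =>
      if p.1 = 0 then out ++ [("lca", some p.2, (none : Option Int))]
      else if p.1 = k - 1 then out ++ [("focal", some p.2, (none : Option Int))]
      else out ++ [("anc", some p.2, (none : Option Int))]) =
      (fun out p => out ++ [((if p.1 = 0 then "lca" else if p.1 = k - 1 then "focal" else "anc"), some p.2, (none : Option Int))]) := by
    funext out p; split_ifs <;> rfl
  rw [hb, PySem.List.foldl_append_singleton_eq_map, List.nil_append]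

theorem getElem_full (xs : List String) (k : Int) (i : Nat) (h : i < xs.length) :
    ((PySem.List.enumerate xs 0).map (fun p =>
      ((if p.1 = 0 then "lca" else if p.1 = k - 1 then "focal" else "anc"), some p.2, (none : Option Int))))[i]'(by
        simp [PySem.List.length_enumerate, h]) =
    ((if (i : Int) = 0 then "lca" else if (i : Int) = k - 1 then "focal" else "anc"), some (xs[i]'h), (none : Option Int)) := by
  simp [List.getElem_map, PySem.List.getElem_enumerate]


theorem take_two {α : Type} (l : List α) (h : 2 ≤ l.length) :
    l.take 2 = [l[0]'(by omega), l[1]'(by omega)] := by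
  match l, h with
  | a :: b :: t, _ => simp

theorem drop_three {α : Type} (l : List α) (m : Nat) (h : l.length = m + 3) :
    l.drop m = [l[m]'(by omega), l[m+1]'(by omega), l[m+2]'(by omega)] := by
  rw [List.drop_eq_getElem_cons (by omega), List.drop_eq_getElem_cons (by omega),
      List.drop_eq_getElem_cons (by omega), List.drop_eq_nil_of_le (by omega)]

theorem main (path_td : List String) : compact_top_down path_td = compact_top_down_alt path_td := by
  unfold compact_top_down compact_top_down_alt
  by_cases h0 : path_td = []
  · subst h0; simp [PySem.List.enumerate]
  by_cases h6 : (path_td.length : Int) ≤ 6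
  · rw [if_neg (by simpa using h0), if_pos h6, if_pos h6, fold_eq_map]
  · rw [if_neg (by simpa using h0), if_neg h6, if_neg h6]
    dsimp only
    have hn : 7 ≤ path_td.length := by omega
    rw [if_pos (by omega : ((path_td.length : Int) - 4 ≥ 2))]
    rw [if_pos (by omega : ((path_td.length : Int) - 4 - 2 + 1 > 0))]
    rw [PySem.List.slice_to _ (by omega), PySem.List.slice_from _ (by omega)]
    have hfl : ((PySem.List.enumerate path_td 0).map (fun p =>
        ((if p.1 = 0 then "lca" else if p.1 = (path_td.length : Int) - 1 then "focal" else "anc"),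
          some p.2, (none : Option Int)))).length = path_td.length := by
      simp [PySem.List.length_enumerate]
    have ht3 : ((path_td.length : Int) - 3).toNat = path_td.length - 3 := by omega
    rw [ht3]
    rw [show (Int.toNat 2) = 2 from rfl]
    rw [take_two _ (by omega), drop_three _ (path_td.length - 3) (by omega)]
    have e0 := getElem_full path_td ((path_td.length : Int)) 0 (by omega)
    have e1 := getElem_full path_td ((path_td.length : Int)) 1 (by omega)
    have e3 := getElem_full path_td ((path_td.length : Int)) (path_td.length - 3) (by omega)
    have e4 := getElem_full path_td ((path_td.length : Int)) (path_td.length - 3 + 1) (by omega)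
    have e5 := getElem_full path_td ((path_td.length : Int)) (path_td.length - 3 + 2) (by omega)
    simp only [e0, e1, e3, e4, e5]
    have n1 : path_td.length - 3 + 1 = path_td.length - 2 := by omega
    have n2 : path_td.length - 3 + 2 = path_td.length - 1 := by omega
    have ha : ((path_td.length - 3 : Nat) : Int) ≠ 0 := by push_cast; omega
    have hb : ((path_td.length - 3 : Nat) : Int) ≠ (path_td.length : Int) - 1 := by push_cast; omega
    have hc : ((path_td.length - 2 : Nat) : Int) ≠ 0 := by push_cast; omega
    have hd : ((path_td.length - 2 : Nat) : Int) ≠ (path_td.length : Int) - 1 := by push_cast; omega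
    have he : ((path_td.length - 1 : Nat) : Int) = (path_td.length : Int) - 1 := by push_cast; omega
    have hf : ((path_td.length - 1 : Nat) : Int) ≠ 0 := by push_cast; omega
    have h1 : ((1 : Int)) ≠ (path_td.length : Int) - 1 := by omega
    have hell : (path_td.length : Int) - 4 - 2 + 1 = (path_td.length : Int) - 5 := by omega
    have g0 : PySem.List.pyGetD path_td 0 "" = path_td[0]'(by omega) :=
      PySem.List.pyGetD_eq_getElem path_td "" (by omega) (by push_cast; omega)
    have g1 : PySem.List.pyGetD path_td 1 "" = path_td[1]'(by omega) :=
      PySem.List.pyGetD_eq_getElem path_td "" (by omega) (by push_cast; omega)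
    have g3 : PySem.List.pyGetD path_td ((path_td.length : Int) - 3) "" = path_td[path_td.length - 3]'(by omega) := by
      rw [PySem.List.pyGetD_eq_getElem path_td "" (by omega) (by push_cast; omega)]
      congr 1 <;> omega
    have g4 : PySem.List.pyGetD path_td ((path_td.length : Int) - 2) "" = path_td[path_td.length - 2]'(by omega) := by
      rw [PySem.List.pyGetD_eq_getElem path_td "" (by omega) (by push_cast; omega)]
      congr 1 <;> omega
    have g5 : PySem.List.pyGetD path_td ((path_td.length : Int) - 1) "" = path_td[path_td.length - 1]'(by omega) := by
      rw [PySem.List.pyGetD_eq_getElem path_td "" (by omega) (by push_cast; omega)]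
      congr 1 <;> omega
    simp [n1, n2, hb, hd, he, h1, hell, g0, g1, g3, g4, g5]
    omega

-- ===== VERDICT (by name: the statement is the Claim_ definition above) =====
theorem compact_top_down_spec : Claim_equal_compact_top_down := by
  intro path_td _
  exact main path_td
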